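-- pv_equiv track=rewrite | github.com/AndersDuncan/webscraping | rolls.py | arrayFixer
-- ===== SOURCE A (Python) =====
-- def arrayFixer(array):
--     fixed = []
--     previousName = None
--     for name in array:
--         if name == None:
--             fixed.append(previousName)
--         else:
--             x = name.replace(":", "")
--             fixed.append(x)
--             previousName = x
--
--     return fixed
-- ===== SOURCE B (Python) =====
-- def arrayFixer(array):
--     def lastName(i):
--         # most recent non-None entry at or before index i, colon-stripped
--         for j in range(i, -1, -1):
--             if array[j] != None:
--                 return array[j].replace(":", "")
--         return None
--     return [lastName(i) for i in range(len(array))]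
-- ===== Notes on version B (the rewrite author's own statement) =====
-- stated objective: alternative
-- what changed: A's stateful forward fill carrying previousName is replaced by a stateless per-index formulation: each output position is computed independently by a backward search for the most recent non-None entry, colon-stripped on the spot.
-- outside the precondition, e.g. on arrayFixer([None, 'a:b']): A returns [None, 'ab'], B returns [None, 'ab']
import Mathlib
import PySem

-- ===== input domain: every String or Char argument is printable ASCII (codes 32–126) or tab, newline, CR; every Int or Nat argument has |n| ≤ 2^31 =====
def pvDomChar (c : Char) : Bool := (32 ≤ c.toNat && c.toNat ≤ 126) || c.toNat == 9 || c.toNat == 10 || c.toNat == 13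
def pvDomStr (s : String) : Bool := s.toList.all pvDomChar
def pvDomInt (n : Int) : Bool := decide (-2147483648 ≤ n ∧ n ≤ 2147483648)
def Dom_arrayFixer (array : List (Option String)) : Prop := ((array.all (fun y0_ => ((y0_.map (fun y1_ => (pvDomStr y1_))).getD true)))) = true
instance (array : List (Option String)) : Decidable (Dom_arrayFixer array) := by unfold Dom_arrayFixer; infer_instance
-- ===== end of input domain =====

-- B replaces A's stateful forward fill with a stateless per-index backward search for
-- the most recent non-None entry; objective: alternative algorithm (B is O(n^2) worst case).


-- ===== PORT A =====
-- A's loop: state is (fixed, previousName); Python's `fixed` may contain None, so the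
-- loop carries List (Option String) and the final list is read back as strings
-- (getD ""); under Pre_arrayFixer no None ever remains, so nothing is invented.
def arrayFixerLoop : List (Option String) → List (Option String) → Option String → List (Option String)
  | [], fixed, _ => fixed
  | name :: rest, fixed, prev =>
    match name with
    | none => arrayFixerLoop rest (fixed ++ [prev]) prev
    | some s =>
      let x := PySem.Str.replace s ":" ""
      arrayFixerLoop rest (fixed ++ [some x]) (some x)

def arrayFixer (array : List (Option String)) : List String :=
  (arrayFixerLoop array [] none).map (fun o => o.getD "")

-- ===== PORT B =====
-- Source B's lastName(i): `for j in range(i, -1, -1)` searching backwards for a non-None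
-- element, returning it colon-stripped (None if the whole prefix is None); ported as a
-- downward recursion on j (every index accessed is in range, so getD is exact).
def lastNameB (array : List (Option String)) : Nat → Option String
  | 0 =>
    match array.getD 0 none with
    | some s => some (PySem.Str.replace s ":" "")
    | none => none
  | j + 1 =>
    match array.getD (j + 1) none with
    | some s => some (PySem.Str.replace s ":" "")
    | none => lastNameB array j

-- Source B: [lastName(i) for i in range(len(array))], read back as strings (getD "") as in port A
def arrayFixer_alt (array : List (Option String)) : List String :=
  (List.range array.length).map (fun i => (lastNameB array i).getD "")

-- ===== PRECONDITION & SPEC =====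
-- Pre_ excludes arrays whose FIRST element is None: there Python A (and B) return a
-- list starting with None, which is not a value of the declared type list[str].
def Pre_arrayFixer (array : List (Option String)) : Prop := array.head? ≠ some none
instance (array : List (Option String)) : Decidable (Pre_arrayFixer array) := by
  unfold Pre_arrayFixer; infer_instance

def pvWitness_arrayFixer : List (Option String) := [some "a:b", none, some "c", none]

def Spec_arrayFixer (array : List (Option String)) (out : List String) : Prop := out = arrayFixer_alt array
instance (array : List (Option String)) (out : List String) : Decidable (Spec_arrayFixer array out) := by unfold Spec_arrayFixer; infer_instance

-- ===== CLAIM (what is proved, stated in full; the proofs are below) =====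
def Claim_equal_arrayFixer : Prop := ∀ (array : List (Option String)), Dom_arrayFixer array → Pre_arrayFixer array → Spec_arrayFixer array (arrayFixer array)

-- ===== LEMMAS AND PROOFS =====

-- lastNameB with an explicit fallback value `prev` (returned when the whole prefix is None)
def gAux (array : List (Option String)) (prev : Option String) : Nat → Option String
  | 0 =>
    match array.getD 0 none with
    | some s => some (PySem.Str.replace s ":" "")
    | none => prev
  | j + 1 =>
    match array.getD (j + 1) none with
    | some s => some (PySem.Str.replace s ":" "")
    | none => gAux array prev j

lemma gAux_none (array : List (Option String)) : ∀ j, gAux array none j = lastNameB array j := by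
  intro j
  induction j with
  | zero => simp [gAux, lastNameB]
  | succ j ih => simp [gAux, lastNameB, ih]

lemma gAux_shift (x : Option String) (rest : List (Option String)) (prev : Option String) :
    ∀ j, gAux (x :: rest) prev (j + 1) = gAux rest (gAux (x :: rest) prev 0) j := by
  intro j
  induction j with
  | zero =>
    simp only [gAux, List.getD_cons_succ]
  | succ j ih =>
    show (match (x :: rest).getD (j + 2) none with
      | some s => some (PySem.Str.replace s ":" "")
      | none => gAux (x :: rest) prev (j + 1)) =
      (match rest.getD (j + 1) none with
      | some s => some (PySem.Str.replace s ":" "")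
      | none => gAux rest (gAux (x :: rest) prev 0) j)
    rw [show (x :: rest).getD (j + 2) none = rest.getD (j + 1) none from rfl]
    cases rest.getD (j + 1) none
    case none => exact ih
    case some s => rfl

lemma arrayFixerLoop_append (rest : List (Option String)) :
    ∀ (fixed : List (Option String)) (prev : Option String),
      arrayFixerLoop rest fixed prev = fixed ++ arrayFixerLoop rest [] prev := by
  induction rest with
  | nil => intro fixed prev; simp [arrayFixerLoop]
  | cons name rest ih =>
    intro fixed prev
    cases name with
    | none =>
      simp only [arrayFixerLoop, List.nil_append]
      rw [ih (fixed ++ [prev]) prev, ih [prev] prev, List.append_assoc]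
    | some s =>
      simp only [arrayFixerLoop, List.nil_append]
      rw [ih, ih [some (PySem.Str.replace s ":" "")], List.append_assoc]

-- A's loop equals the per-index backward search with fallback prev
lemma loop_eq_gAux : ∀ (xs : List (Option String)) (prev : Option String),
    arrayFixerLoop xs [] prev = (List.range xs.length).map (gAux xs prev) := by
  intro xs
  induction xs with
  | nil => intro prev; simp [arrayFixerLoop]
  | cons x rest ih =>
    intro prev
    have hrange : List.range (rest.length + 1) = 0 :: (List.range rest.length).map Nat.succ :=
      List.range_succ_eq_map (n := rest.length)
    have hmap : (List.range (x :: rest).length).map (gAux (x :: rest) prev) =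
        gAux (x :: rest) prev 0 ::
          (List.range rest.length).map (gAux rest (gAux (x :: rest) prev 0)) := by
      simp only [List.length_cons, hrange, List.map_cons, List.map_map]
      congr 1
      apply List.map_congr_left
      intro j _
      exact gAux_shift x rest prev j
    rw [hmap, ← ih]
    cases x with
    | none =>
      show arrayFixerLoop rest ([] ++ [prev]) prev = _
      rw [List.nil_append, arrayFixerLoop_append rest [prev] prev]
      simp [gAux]
    | some s =>
      show arrayFixerLoop rest ([] ++ [some (PySem.Str.replace s ":" "")]) _ = _
      rw [List.nil_append, arrayFixerLoop_append]
      simp [gAux]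

-- ===== VERDICT (by name: the statement is the Claim_ definition above) =====
theorem arrayFixer_spec : Claim_equal_arrayFixer := by
  intro array _ _
  unfold Spec_arrayFixer arrayFixer arrayFixer_alt
  rw [loop_eq_gAux, List.map_map]
  apply List.map_congr_left
  intro j _
  simp [gAux_none]
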